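-- pv_equiv track=rewrite | github.com/jacksonyuanyoyo-png/nl2sql | src/mine_agent/api/fastapi/enrich_jobs.py | _resolve_target_table
-- ===== SOURCE A (Python) =====
-- from typing import Any, Dict, List, Optional, Tuple
--
-- def _resolve_target_table(base: str, table_names: set, table_map: dict) -> Optional[str]:
--     """Resolve target table from FK column base. Handles plural forms and prefixes (TB_, T_, etc)."""
--     base_upper = base.upper()
--     if base_upper in table_names:
--         return table_map[base_upper]["name"]
--     for suffix in ("S", "ES"):
--         candidate = base_upper + suffix
--         if candidate in table_names:
--             return table_map[candidate]["name"]
--     if base_upper.endswith("Y") and (base_upper[:-1] + "IES") in table_names: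
--         return table_map[base_upper[:-1] + "IES"]["name"]
--     # Try tables with common prefixes: TB_ORDER, T_ORDERS, tab_orders
--     for prefix in ("TB_", "T_", "TBL_", "TABLE_"):
--         for suffix in ("", "S", "ES"):
--             candidate = prefix + base_upper + suffix
--             if candidate in table_names:
--                 return table_map[candidate]["name"]
--     return None
-- ===== SOURCE B (Python) =====
-- def _variant_rank(bu, t):
--     """Priority of table name t as a variant of base bu (lower = higher priority), None if no match."""
--     if t == bu:
--         return 0
--     if t == bu + "S":
--         return 1
--     if t == bu + "ES":
--         return 2
--     if bu.endswith("Y") and t == bu[:-1] + "IES":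
--         return 3
--     r = 4
--     for p in ("TB_", "T_", "TBL_", "TABLE_"):
--         for s in ("", "S", "ES"):
--             if t == p + bu + s:
--                 return r
--             r += 1
--     return None
--
--
-- def _resolve_target_table(base, table_names, table_map):
--     """Inverted scan: classify each table name against the base and keep the best-ranked match."""
--     bu = base.upper()
--     best = None
--     for t in table_names:
--         r = _variant_rank(bu, t)
--         if r is not None and (best is None or r < best[0]):
--             best = (r, t)
--     return table_map[best[1]]["name"] if best is not None else None
-- ===== Notes on version B (the rewrite author's own statement) =====
-- stated objective: alternative
-- what changed: A generates candidate table names in priority order and probes the table-name set for each; B inverts the iteration: it scans the table-name set once, assigns each name a priority rank as a variant of the base via a classifier, and keeps the minimal-rank match with an argmin accumulator.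
import Mathlib
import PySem

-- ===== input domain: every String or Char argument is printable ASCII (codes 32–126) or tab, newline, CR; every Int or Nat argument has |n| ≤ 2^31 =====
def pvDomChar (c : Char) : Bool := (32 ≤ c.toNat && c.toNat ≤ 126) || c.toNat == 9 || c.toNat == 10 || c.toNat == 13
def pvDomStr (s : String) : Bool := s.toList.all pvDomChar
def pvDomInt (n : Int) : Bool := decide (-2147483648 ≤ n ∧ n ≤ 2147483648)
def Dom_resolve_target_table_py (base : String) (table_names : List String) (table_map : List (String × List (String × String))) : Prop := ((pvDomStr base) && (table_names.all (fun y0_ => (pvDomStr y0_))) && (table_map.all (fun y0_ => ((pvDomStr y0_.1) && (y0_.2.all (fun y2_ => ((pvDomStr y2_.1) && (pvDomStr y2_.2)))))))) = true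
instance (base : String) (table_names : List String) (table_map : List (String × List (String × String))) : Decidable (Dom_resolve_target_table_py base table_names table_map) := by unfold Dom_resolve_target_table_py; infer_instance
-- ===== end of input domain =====

-- B inverts A's iteration (objective: alternative): A probes the table-name set with generated
-- candidates; B scans the table-name set once, ranks each name as a variant of the base, and
-- keeps the minimal-rank match.

-- ===== PORT A =====
-- table_map[c]["name"]: first-match association-list lookup, none where Python raises KeyError (excluded by Pre_)
def pvNameA (table_map : List (String × List (String × String))) (c : String) : Option String :=
  match table_map.find? (fun p => p.1 == c) with
  | some p =>
    match p.2.find? (fun q => q.1 == "name") with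
    | some q => some q.2
    | none => none
  | none => none

-- the 'for suffix in ("S","ES")' loop (also reused for the inner suffix loop with bu := prefix + base_upper)
def pvLoopSufA (bu : String) (table_names : List String)
    (table_map : List (String × List (String × String))) : List String → Option (Option String)
  | [] => none
  | s :: rest =>
    let c := bu ++ s
    if table_names.contains c then some (pvNameA table_map c)
    else pvLoopSufA bu table_names table_map rest

-- the 'for prefix in ("TB_","T_","TBL_","TABLE_")' loop
def pvLoopPreA (bu : String) (table_names : List String)
    (table_map : List (String × List (String × String))) : List String → Option (Option String)
  | [] => none
  | p :: rest =>
    match pvLoopSufA (p ++ bu) table_names table_map ["", "S", "ES"] with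
    | some r => some r
    | none => pvLoopPreA bu table_names table_map rest

def resolve_target_table_py (base : String) (table_names : List String) (table_map : List (String × List (String × String))) : Option String :=
  let bu := PySem.Str.upper base
  if table_names.contains bu then pvNameA table_map bu
  else
    match pvLoopSufA bu table_names table_map ["S", "ES"] with
    | some r => r
    | none =>
      if PySem.Str.endswith bu "Y" &&
          table_names.contains (String.ofList (PySem.List.slice bu.toList none (some (-1))) ++ "IES") then
        pvNameA table_map (String.ofList (PySem.List.slice bu.toList none (some (-1))) ++ "IES")
      else
        match pvLoopPreA bu table_names table_map ["TB_", "T_", "TBL_", "TABLE_"] with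
        | some r => r
        | none => none

-- ===== PORT B =====
def pvNameB (table_map : List (String × List (String × String))) (c : String) : Option String :=
  match table_map.find? (fun p => p.1 == c) with
  | some p =>
    match p.2.find? (fun q => q.1 == "name") with
    | some q => some q.2
    | none => none
  | none => none

-- _variant_rank's inner 'for s in ("","S","ES")' loop, carrying the running counter r
def pvRankSufB (bu t p : String) (r : Nat) : List String → Option Nat
  | [] => none
  | s :: ss => if t == p ++ bu ++ s then some r else pvRankSufB bu t p (r + 1) ss

-- _variant_rank's outer 'for p in ("TB_","T_","TBL_","TABLE_")' loop
def pvRankPreB (bu t : String) (r : Nat) : List String → Option Nat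
  | [] => none
  | p :: ps =>
    match pvRankSufB bu t p r ["", "S", "ES"] with
    | some x => some x
    | none => pvRankPreB bu t (r + 3) ps

-- _variant_rank: priority of table name t as a variant of bu, none if t matches no variant form
def pvRankB (bu t : String) : Option Nat :=
  if t == bu then some 0
  else if t == bu ++ "S" then some 1
  else if t == bu ++ "ES" then some 2
  else if PySem.Str.endswith bu "Y" &&
      (t == String.ofList (PySem.List.slice bu.toList none (some (-1))) ++ "IES") then some 3
  else pvRankPreB bu t 4 ["TB_", "T_", "TBL_", "TABLE_"]

-- the loop body: keep the best-ranked (rank, name) pair seen so far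
def pvStepB (bu : String) (best : Option (Nat × String)) (t : String) : Option (Nat × String) :=
  match pvRankB bu t with
  | none => best
  | some r =>
    match best with
    | none => some (r, t)
    | some b => if r < b.1 then some (r, t) else best

def resolve_target_table_py_alt (base : String) (table_names : List String) (table_map : List (String × List (String × String))) : Option String :=
  let bu := PySem.Str.upper base
  match table_names.foldl (pvStepB bu) none with
  | some b => pvNameB table_map b.2
  | none => none

-- ===== PRECONDITION & SPEC =====
-- Pre_ excludes exactly the inputs where Python A raises KeyError: the best-matching table name
-- (if any) must have a table_map entry that carries a "name" key.
def pvPreCands (bu : String) : List String :=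
  [bu, bu ++ "S", bu ++ "ES"] ++
  (if PySem.Str.endswith bu "Y" then
     [String.ofList (PySem.List.slice bu.toList none (some (-1))) ++ "IES"] else []) ++
  (["TB_", "T_", "TBL_", "TABLE_"].flatMap fun p => ["", "S", "ES"].map fun s => p ++ bu ++ s)

def pvPreName (table_map : List (String × List (String × String))) (c : String) : Option String :=
  match table_map.find? (fun p => p.1 == c) with
  | some p =>
    match p.2.find? (fun q => q.1 == "name") with
    | some q => some q.2
    | none => none
  | none => none

def Pre_resolve_target_table_py (base : String) (table_names : List String) (table_map : List (String × List (String × String))) : Prop :=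
  (((pvPreCands (PySem.Str.upper base)).find? (fun c => table_names.contains c)).all
    (fun c => (pvPreName table_map c).isSome)) = true
instance (base : String) (table_names : List String) (table_map : List (String × List (String × String))) : Decidable (Pre_resolve_target_table_py base table_names table_map) := by unfold Pre_resolve_target_table_py; infer_instance

def pvWitness_resolve_target_table_py : String × List String × (List (String × List (String × String))) :=
  ("user", ["USERS"], [("USERS", [("name", "users")])])

def Spec_resolve_target_table_py (base : String) (table_names : List String) (table_map : List (String × List (String × String))) (out : Option String) : Prop := out = resolve_target_table_py_alt base table_names table_map
instance (base : String) (table_names : List String) (table_map : List (String × List (String × String))) (out : Option String) : Decidable (Spec_resolve_target_table_py base table_names table_map out) := by unfold Spec_resolve_target_table_py; infer_instance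

-- ===== CLAIM (what is proved, stated in full; the proofs are below) =====
def Claim_equal_resolve_target_table_py : Prop := ∀ (base : String) (table_names : List String) (table_map : List (String × List (String × String))), Dom_resolve_target_table_py base table_names table_map → Pre_resolve_target_table_py base table_names table_map → Spec_resolve_target_table_py base table_names table_map (resolve_target_table_py base table_names table_map)

-- ===== LEMMAS AND PROOFS =====
theorem pvName_eq (tm : List (String × List (String × String))) (c : String) :
    pvNameA tm c = pvNameB tm c := rfl

-- A's candidate list in priority order (proof helper)
def pvCandsB (bu : String) : List String :=
  [bu, bu ++ "S", bu ++ "ES"] ++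
  (if PySem.Str.endswith bu "Y" then
     [String.ofList (PySem.List.slice bu.toList none (some (-1))) ++ "IES"] else []) ++
  (["TB_", "T_", "TBL_", "TABLE_"].flatMap fun p => ["", "S", "ES"].map fun s => p ++ bu ++ s)

-- prefixed candidate segments tagged with their priority ranks
def pvTag (bu p : String) (r : Nat) : List String → List (Nat × String)
  | [] => []
  | s :: ss => (r, p ++ bu ++ s) :: pvTag bu p (r + 1) ss

def pvTagPre (bu : String) (r : Nat) : List String → List (Nat × String)
  | [] => []
  | p :: ps => pvTag bu p r ["", "S", "ES"] ++ pvTagPre bu (r + 3) ps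

-- the full candidate list with priority ranks attached
def pvRanked (bu : String) : List (Nat × String) :=
  [(0, bu), (1, bu ++ "S"), (2, bu ++ "ES")] ++
  (if PySem.Str.endswith bu "Y" then
     [(3, String.ofList (PySem.List.slice bu.toList none (some (-1))) ++ "IES")] else []) ++
  pvTagPre bu 4 ["TB_", "T_", "TBL_", "TABLE_"]

def pvMerge (a b : Option (Nat × String)) : Option (Nat × String) :=
  match a, b with
  | none, b => b
  | some x, none => some x
  | some x, some y => if y.1 < x.1 then some y else some x

theorem pvRankSufB_eq_find (bu t p : String) :
    ∀ (ss : List String) (r : Nat),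
      (pvRankSufB bu t p r ss).map (fun x => (x, t)) =
        (pvTag bu p r ss).find? (fun q => t == q.2) := by
  intro ss
  induction ss with
  | nil => intro r; rfl
  | cons s rest ih =>
    intro r
    by_cases h : (t == p ++ bu ++ s) = true
    · have ht : t = p ++ bu ++ s := by simpa using h
      simp [pvRankSufB, pvTag, ht]
    · simp only [pvRankSufB, pvTag, List.find?_cons]
      rw [if_neg h, ih]
      have h' : (t == (r, p ++ bu ++ s).2) = false := by simpa using h
      simp [h']

theorem pvRankPreB_eq_find (bu t : String) :
    ∀ (ps : List String) (r : Nat),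
      (pvRankPreB bu t r ps).map (fun x => (x, t)) =
        (pvTagPre bu r ps).find? (fun q => t == q.2) := by
  intro ps
  induction ps with
  | nil => intro r; rfl
  | cons p rest ih =>
    intro r
    simp only [pvRankPreB, pvTagPre, List.find?_append]
    cases h : pvRankSufB bu t p r ["", "S", "ES"] with
    | some x =>
      have := pvRankSufB_eq_find bu t p ["", "S", "ES"] r
      rw [h] at this
      simp [← this]
    | none =>
      have := pvRankSufB_eq_find bu t p ["", "S", "ES"] r
      rw [h] at this
      simp [← this, ih]

-- rank as a first-match scan of the ranked candidate list
theorem pvRankB_eq_find (bu t : String) :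
    (pvRankB bu t).map (fun r => (r, t)) =
      (pvRanked bu).find? (fun p => t == p.2) := by
  unfold pvRankB pvRanked
  by_cases h0 : (t == bu) = true
  · simp [(by simpa using h0 : t = bu)]
  · simp only [List.cons_append, List.find?_cons, if_neg h0]
    rw [show (t == (0, bu).2) = false by simpa using h0]
    by_cases h1 : (t == bu ++ "S") = true
    · simp [(by simpa using h1 : t = bu ++ "S")]
    · rw [if_neg h1, show (t == (1, bu ++ "S").2) = false by simpa using h1]
      by_cases h2 : (t == bu ++ "ES") = true
      · simp [(by simpa using h2 : t = bu ++ "ES")]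
      · rw [if_neg h2, show (t == (2, bu ++ "ES").2) = false by simpa using h2]
        by_cases hY : PySem.Str.endswith bu "Y"
        · simp only [hY, Bool.true_and, if_true]
          by_cases h3 : (t == String.ofList (PySem.List.slice bu.toList none (some (-1))) ++ "IES") = true
          · simp [(by simpa using h3 : t = String.ofList (PySem.List.slice bu.toList none (some (-1))) ++ "IES")]
          · rw [if_neg h3]
            simp only [List.nil_append, List.cons_append, List.find?_cons]
            rw [show (t == ((3 : Nat), String.ofList (PySem.List.slice bu.toList none (some (-1))) ++ "IES").2) = false by simpa using h3]
            simp only [Bool.false_eq_true, if_false]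
            exact pvRankPreB_eq_find bu t ["TB_", "T_", "TBL_", "TABLE_"] 4
        · simp only [hY, Bool.false_and, Bool.false_eq_true, if_false, List.nil_append]
          exact pvRankPreB_eq_find bu t ["TB_", "T_", "TBL_", "TABLE_"] 4

theorem pvTagPre_snd (bu : String) :
    ∀ (ps : List String) (r : Nat),
      (pvTagPre bu r ps).map Prod.snd = ps.flatMap fun p => ["", "S", "ES"].map fun s => p ++ bu ++ s := by
  intro ps
  induction ps with
  | nil => intro r; rfl
  | cons p rest ih => intro r; simp [pvTagPre, pvTag, ih]

theorem pvCandsB_eq_map (bu : String) : pvCandsB bu = (pvRanked bu).map Prod.snd := by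
  unfold pvCandsB pvRanked
  by_cases hY : PySem.Chars.endswith bu.toList ['Y'] = true <;>
    simp [PySem.Str.endswith, hY, pvTagPre_snd]

theorem pvRanked_pairwise (bu : String) :
    (pvRanked bu).Pairwise (fun a b => a.1 < b.1) := by
  have h : ((pvRanked bu).map Prod.fst).Pairwise (· < ·) := by
    by_cases hY : PySem.Chars.endswith bu.toList ['Y'] = true
    · have : (pvRanked bu).map Prod.fst = [0, 1, 2, 3, 4, 5, 6, 7, 8, 9, 10, 11, 12, 13, 14, 15] := by
        simp [pvRanked, pvTagPre, pvTag, PySem.Str.endswith, hY]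
      rw [this]; decide
    · have : (pvRanked bu).map Prod.fst = [0, 1, 2, 4, 5, 6, 7, 8, 9, 10, 11, 12, 13, 14, 15] := by
        simp [pvRanked, pvTagPre, pvTag, PySem.Str.endswith, hY]
      rw [this]; decide
  exact (List.pairwise_map.mp h)

-- the loop body is a rank-merge with the ranked pair of t
theorem pvStepB_eq_merge (bu : String) (best : Option (Nat × String)) (t : String) :
    pvStepB bu best t = pvMerge best ((pvRankB bu t).map (fun r => (r, t))) := by
  cases h : pvRankB bu t <;> cases best <;> simp [pvStepB, pvMerge, h]

theorem pvMerge_assoc (a b c : Option (Nat × String)) :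
    pvMerge (pvMerge a b) c = pvMerge a (pvMerge b c) := by
  cases a with
  | none => cases b <;> cases c <;> simp [pvMerge]
  | some x =>
    cases b with
    | none => cases c <;> simp [pvMerge]
    | some y =>
      cases c with
      | none =>
        by_cases h1 : y.1 < x.1 <;> simp [pvMerge, h1]
      | some z =>
        by_cases h1 : y.1 < x.1 <;> by_cases h2 : z.1 < y.1 <;> by_cases h3 : z.1 < x.1 <;>
          simp [pvMerge, h1, h2, h3] <;> omega

-- first match of a disjunctive predicate, on a rank-sorted list, is the rank-merge of the two first matches
theorem pv_find?_or (p q : Nat × String → Bool) :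
    ∀ (l : List (Nat × String)), l.Pairwise (fun a b => a.1 < b.1) →
      l.find? (fun x => p x || q x) = pvMerge (l.find? p) (l.find? q) := by
  intro l
  induction l with
  | nil => intro _; rfl
  | cons x xs ih =>
    intro hl
    rw [List.pairwise_cons] at hl
    obtain ⟨hx, hxs⟩ := hl
    by_cases hpx : p x = true
    · by_cases hqx : q x = true
      · simp [List.find?_cons, hpx, hqx, pvMerge]
      · simp only [List.find?_cons, hpx, hqx, Bool.true_or, if_true]
        cases h : xs.find? q with
        | none => simp [pvMerge, hqx, h]
        | some y =>
          have := hx y (List.mem_of_find?_eq_some h)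
          simp only [Bool.false_eq_true, if_false, h, pvMerge]
          rw [if_neg (by omega)]
    · by_cases hqx : q x = true
      · simp only [List.find?_cons, hpx, hqx, Bool.false_or, if_true, Bool.false_eq_true, if_false]
        cases h : xs.find? p with
        | none => simp [pvMerge]
        | some y =>
          have := hx y (List.mem_of_find?_eq_some h)
          simp only [pvMerge]
          rw [if_pos (by omega)]
      · simp only [List.find?_cons, hpx, hqx, Bool.false_or, Bool.false_eq_true, if_false]
        exact ih hxs

-- B's argmin fold over the table names equals the first ranked candidate present in them
theorem pvFold_eq_find (bu : String) :
    ∀ (tns : List String) (acc : Option (Nat × String)),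
      tns.foldl (pvStepB bu) acc =
        pvMerge acc ((pvRanked bu).find? (fun p => tns.contains p.2)) := by
  intro tns
  induction tns with
  | nil =>
    intro acc
    have h : (pvRanked bu).find? (fun p => ([] : List String).contains p.2) = none := by
      simp
    rw [List.foldl_nil, h]
    cases acc <;> rfl
  | cons t rest ih =>
    intro acc
    have hpred : (fun p : Nat × String => (t :: rest).contains p.2) =
        (fun p : Nat × String => (t == p.2) || rest.contains p.2) := by
      funext q
      by_cases h : q.2 = t
      · simp [h, List.contains_cons]
      · have hq : (t == q.2) = false := by
          simp only [beq_eq_false_iff_ne]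
          exact fun hh => h hh.symm
        simp [h, hq, List.contains_cons]
    rw [List.foldl_cons, ih, pvStepB_eq_merge, pvMerge_assoc, hpred,
      pv_find?_or _ _ _ (pvRanked_pairwise bu), pvRankB_eq_find]

-- A's interleaved early-return chain equals the first-hit scan of the concatenated candidate list
theorem pvChain (p : String → Bool) (f : String → Option String) (b : Bool)
    (bu ies : String) (l1 l2 : List String) :
    (if p bu then f bu
     else
       match (l1.find? p).map f with
       | some r => r
       | none =>
         if b && p ies then f ies
         else
           match (l2.find? p).map f with
           | some r => r
           | none => none) =
    (match (bu :: (l1 ++ ((if b then [ies] else []) ++ l2))).find? p with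
     | some c => f c
     | none => none) := by
  cases hpu : p bu with
  | true => simp [hpu]
  | false =>
    simp only [List.find?_cons, hpu, Bool.false_eq_true, if_false, List.find?_append]
    cases h1 : l1.find? p with
    | some c => simp [Option.or]
    | none =>
      simp only [Option.map_none, Option.none_or]
      cases hb : b with
      | false =>
        simp only [Bool.false_and, Bool.false_eq_true, if_false, List.find?_nil, Option.none_or]
        cases h2 : l2.find? p <;> simp
      | true =>
        simp only [Bool.true_and]
        cases hpi : p ies with
        | true => simp [hpi]
        | false =>
          cases h2 : l2.find? p <;> simp [hpi]

-- A's suffix loop is the first-hit scan of the mapped suffix list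
theorem pvLoopSufA_eq (bu : String) (tns : List String)
    (tm : List (String × List (String × String))) (l : List String) :
    pvLoopSufA bu tns tm l =
      ((l.map (fun s => bu ++ s)).find? (fun c => tns.contains c)).map (fun c => pvNameA tm c) := by
  induction l with
  | nil => rfl
  | cons s rest ih =>
    by_cases h : bu ++ s ∈ tns <;>
      simp [pvLoopSufA, ih, h]

-- A's prefix×suffix double loop is the first-hit scan of the flattened candidate list
theorem pvLoopPreA_eq (bu : String) (tns : List String)
    (tm : List (String × List (String × String))) (ps : List String) :
    pvLoopPreA bu tns tm ps =
      ((ps.flatMap fun p => ["", "S", "ES"].map (fun s => (p ++ bu) ++ s)).find?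
        (fun c => tns.contains c)).map (fun c => pvNameA tm c) := by
  induction ps with
  | nil => rfl
  | cons p rest ih =>
    simp only [pvLoopPreA, List.flatMap_cons, List.find?_append, pvLoopSufA_eq, ih]
    cases h : (["", "S", "ES"].map (fun s => (p ++ bu) ++ s)).find? (fun c => tns.contains c) <;>
      simp

-- A as a first-hit scan of the full candidate list
set_option maxHeartbeats 1000000 in
theorem pvA_eq_find (bu : String) (tns : List String) (tm : List (String × List (String × String))) :
    (if tns.contains bu then pvNameA tm bu
     else
       match pvLoopSufA bu tns tm ["S", "ES"] with
       | some r => r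
       | none =>
         if PySem.Str.endswith bu "Y" &&
             tns.contains (String.ofList (PySem.List.slice bu.toList none (some (-1))) ++ "IES") then
           pvNameA tm (String.ofList (PySem.List.slice bu.toList none (some (-1))) ++ "IES")
         else
           match pvLoopPreA bu tns tm ["TB_", "T_", "TBL_", "TABLE_"] with
           | some r => r
           | none => none) =
    (match (pvCandsB bu).find? (fun c => tns.contains c) with
     | some c => pvNameA tm c
     | none => none) := by
  rw [pvLoopSufA_eq, pvLoopPreA_eq,
    pvChain (fun c => tns.contains c) (fun c => pvNameA tm c) (PySem.Str.endswith bu "Y") bu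
      (String.ofList (PySem.List.slice bu.toList none (some (-1))) ++ "IES")
      (["S", "ES"].map (fun s => bu ++ s))
      (["TB_", "T_", "TBL_", "TABLE_"].flatMap fun p => ["", "S", "ES"].map (fun s => (p ++ bu) ++ s))]
  simp only [pvCandsB, List.map_cons, List.map_nil, List.cons_append, List.nil_append]

-- ===== VERDICT (by name: the statement is the Claim_ definition above) =====
theorem resolve_target_table_py_spec : Claim_equal_resolve_target_table_py := by
  intro base tns tm _ _
  unfold Spec_resolve_target_table_py
  have hA : resolve_target_table_py base tns tm =
      (match (pvCandsB (PySem.Str.upper base)).find? (fun c => tns.contains c) with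
       | some c => pvNameA tm c
       | none => none) := pvA_eq_find (PySem.Str.upper base) tns tm
  have hB : resolve_target_table_py_alt base tns tm =
      (match (pvRanked (PySem.Str.upper base)).find? (fun p => tns.contains p.2) with
       | some b => pvNameB tm b.2
       | none => none) := by
    show (match tns.foldl (pvStepB (PySem.Str.upper base)) none with
          | some b => pvNameB tm b.2
          | none => none) = _
    rw [pvFold_eq_find]
    cases h : (pvRanked (PySem.Str.upper base)).find? (fun p => tns.contains p.2) <;>
      simp [pvMerge]
  rw [hA, hB, pvCandsB_eq_map, List.find?_map]
  have hp : ((fun c => tns.contains c) ∘ (Prod.snd : Nat × String → String)) =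
      (fun p : Nat × String => tns.contains p.2) := rfl
  rw [hp]
  cases h : (pvRanked (PySem.Str.upper base)).find? (fun p : Nat × String => tns.contains p.2) <;>
    simp [pvName_eq]
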